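-- pv_equiv track=rewrite | github.com/adam-kabela/box_size_optimization | optimal_orthogonal_packing.py | keep_minimal
-- ===== SOURCE A (Python) =====
-- def keep_minimal(containers_and_layouts):
--     output = []
--     #sort by container width and if tie use length
--     containers_and_layouts.sort(key = lambda x: (x[0][0], x[0][1]))
--     for p in containers_and_layouts: #sorted from smallest
--         is_best = True
--         for b in output:
--             p_container = p[0]
--             b_container = b[0]
--             if b_container[0] <= p_container[0] and b_container[1] <= p_container[1]:
--                 is_best = False
--                 break
--         if is_best:
--             output.append(p)
--     return output
-- ===== SOURCE B (Python) =====
-- def keep_minimal(containers_and_layouts):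
--     # Same in-place sort as A; then one pass tracking the smallest kept length.
--     containers_and_layouts.sort(key=lambda x: (x[0][0], x[0][1]))
--     output = []
--     best_len = None
--     for p in containers_and_layouts:
--         if best_len is None or p[0][1] < best_len:
--             output.append(p)
--             best_len = p[0][1]
--     return output
-- ===== Notes on version B (the rewrite author's own statement) =====
-- stated objective: alternative
-- what changed: After the same sort, B drops A's inner rescan of the kept list and instead keeps an item iff its length beats a running minimum of kept lengths, maintained in a single pass.
import Mathlib
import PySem

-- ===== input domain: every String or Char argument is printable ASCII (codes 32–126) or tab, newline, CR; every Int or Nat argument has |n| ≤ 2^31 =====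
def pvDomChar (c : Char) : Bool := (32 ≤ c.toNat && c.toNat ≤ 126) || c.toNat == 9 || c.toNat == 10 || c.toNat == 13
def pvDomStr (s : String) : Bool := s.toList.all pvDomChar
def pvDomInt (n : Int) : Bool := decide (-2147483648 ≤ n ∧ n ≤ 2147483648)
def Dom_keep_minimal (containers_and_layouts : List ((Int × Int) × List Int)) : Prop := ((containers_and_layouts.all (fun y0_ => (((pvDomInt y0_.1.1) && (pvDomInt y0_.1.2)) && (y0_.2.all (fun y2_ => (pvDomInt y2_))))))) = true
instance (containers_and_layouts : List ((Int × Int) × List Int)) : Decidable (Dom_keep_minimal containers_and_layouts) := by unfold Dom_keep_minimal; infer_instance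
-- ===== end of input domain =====

-- B replaces A's rescan of the kept list by a single pass over the sorted list tracking the
-- smallest kept length (objective: alternative; avoids the inner scan, no speed claim).
-- Both A and B sort the input list in place in Python; equivalence is about the return value.


-- ===== PORT A =====
-- inner 'for b in output' loop with its break
def kmIsBest (p : (Int × Int) × List Int) : List ((Int × Int) × List Int) → Bool
  | [] => true
  | b :: rest =>
    if b.1.1 ≤ p.1.1 ∧ b.1.2 ≤ p.1.2 then false else kmIsBest p rest

def keep_minimal (containers_and_layouts : List ((Int × Int) × List Int)) : List ((Int × Int) × List Int) :=
  (PySem.List.sorted2 containers_and_layouts (fun x => x.1.1) (fun x => x.1.2)).foldl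
    (fun output p => if kmIsBest p output then output ++ [p] else output) []

-- ===== PORT B =====
-- one step of B's single pass: keep p iff its length beats the best (smallest) kept length so far
def kmStep (acc : List ((Int × Int) × List Int) × Option Int) (p : (Int × Int) × List Int) :
    List ((Int × Int) × List Int) × Option Int :=
  match acc.2 with
  | none => (acc.1 ++ [p], some p.1.2)
  | some v => if p.1.2 < v then (acc.1 ++ [p], some p.1.2) else acc

def keep_minimal_alt (containers_and_layouts : List ((Int × Int) × List Int)) : List ((Int × Int) × List Int) :=
  ((PySem.List.sorted2 containers_and_layouts (fun x => x.1.1) (fun x => x.1.2)).foldl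
    kmStep ([], none)).1

-- ===== PRECONDITION & SPEC =====
def Spec_keep_minimal (containers_and_layouts : List ((Int × Int) × List Int)) (out : List ((Int × Int) × List Int)) : Prop := out = keep_minimal_alt containers_and_layouts
instance (containers_and_layouts : List ((Int × Int) × List Int)) (out : List ((Int × Int) × List Int)) : Decidable (Spec_keep_minimal containers_and_layouts out) := by unfold Spec_keep_minimal; infer_instance

-- ===== CLAIM (what is proved, stated in full; the proofs are below) =====
def Claim_equal_keep_minimal : Prop := ∀ (containers_and_layouts : List ((Int × Int) × List Int)), Dom_keep_minimal containers_and_layouts → Spec_keep_minimal containers_and_layouts (keep_minimal containers_and_layouts)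

-- ===== LEMMAS AND PROOFS =====

-- A's inner loop returns true iff no kept container dominates p
theorem kmIsBest_true_iff (p : (Int × Int) × List Int) (out : List ((Int × Int) × List Int)) :
    kmIsBest p out = true ↔ ∀ b ∈ out, ¬ (b.1.1 ≤ p.1.1 ∧ b.1.2 ≤ p.1.2) := by
  induction out with
  | nil => simp [kmIsBest]
  | cons b rest ih =>
    simp only [kmIsBest]
    by_cases h : b.1.1 ≤ p.1.1 ∧ b.1.2 ≤ p.1.2
    · simp [h]
    · simp only [if_neg h, ih, List.mem_cons]
      constructor
      · rintro ha x (rfl | hx)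
        · exact h
        · exact ha x hx
      · intro ha x hx
        exact ha x (Or.inr hx)

-- sorted2 with the two integer projections is sorted with the lexicographic key
theorem sorted2_eq_sorted_lex (xs : List ((Int × Int) × List Int)) :
    PySem.List.sorted2 xs (fun x => x.1.1) (fun x => x.1.2) =
    PySem.List.sorted xs (fun x => toLex (x.1.1, x.1.2)) := by
  unfold PySem.List.sorted2 PySem.List.sorted
  simp only [Bool.false_eq_true, if_false]
  congr 1
  funext acc x
  congr 1
  funext a b
  by_cases h1 : a.1.1 < b.1.1 <;> by_cases h2 : b.1.1 < a.1.1 <;>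
    by_cases h3 : a.1.2 < b.1.2 <;>
    simp [h1, h2, h3, Prod.Lex.lt_iff] <;> omega

-- the loop invariant: A's fold over out equals B's fold over (out, min kept length)
theorem loop_eq (s : List ((Int × Int) × List Int)) :
    ∀ (out : List ((Int × Int) × List Int)) (m : Option Int),
    (∀ b ∈ out, ∀ q ∈ s, b.1.1 ≤ q.1.1) →
    s.Pairwise (fun a b => a.1.1 ≤ b.1.1) →
    (match m with
     | none => out = []
     | some v => (∀ b ∈ out, v ≤ b.1.2) ∧ ∃ b ∈ out, b.1.2 = v) →
    s.foldl (fun output p => if kmIsBest p output then output ++ [p] else output) out =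
    (s.foldl kmStep (out, m)).1 := by
  induction s with
  | nil => intro out m _ _ _; rfl
  | cons p rest ih =>
    intro out m hw hs hm
    have hw_p : ∀ b ∈ out, b.1.1 ≤ p.1.1 := fun b hb => hw b hb p (by simp)
    have hs_rest := (List.pairwise_cons.mp hs).2
    have hp_rest : ∀ q ∈ rest, p.1.1 ≤ q.1.1 := (List.pairwise_cons.mp hs).1
    cases m with
    | none =>
      have hout : out = [] := hm
      subst hout
      simp only [List.foldl_cons, kmStep, kmIsBest]
      exact ih [p] (some p.1.2)
        (by intro b hb q hq; simp at hb; subst hb; exact hp_rest q hq)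
        hs_rest
        (by refine ⟨?_, p, by simp⟩; intro b hb; simp at hb; subst hb; exact le_refl _)
    | some v =>
      obtain ⟨hmin, b0, hb0, hb0v⟩ := hm
      by_cases hkeep : p.1.2 < v
      · have hbest : kmIsBest p out = true := by
          rw [kmIsBest_true_iff]
          intro b hb hcon
          exact absurd hcon.2 (by have := hmin b hb; omega)
        simp only [List.foldl_cons, kmStep, if_pos hkeep, hbest]
        exact ih (out ++ [p]) (some p.1.2)
          (by intro b hb q hq
              rcases List.mem_append.mp hb with h | h
              · exact le_trans (hw b h p (by simp)) (hp_rest q hq)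
              · simp at h; subst h; exact hp_rest q hq)
          hs_rest
          (by refine ⟨?_, p, by simp⟩
              intro b hb
              rcases List.mem_append.mp hb with h | h
              · have := hmin b h; omega
              · simp at h; subst h; exact le_refl _)
      · have hbest : kmIsBest p out = false := by
          rcases Bool.eq_false_or_eq_true (kmIsBest p out) with h | h
          · exact absurd ⟨hw_p b0 hb0, by omega⟩ ((kmIsBest_true_iff p out).mp h b0 hb0)
          · exact h
        have eA : (if kmIsBest p out = true then out ++ [p] else out) = out := by
          rw [hbest]; simp
        have eB : kmStep (out, some v) p = (out, some v) := by
          simp [kmStep, hkeep]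
        rw [List.foldl_cons, List.foldl_cons, eA, eB]
        exact ih out (some v)
          (fun b hb q hq => hw b hb q (by simp [hq]))
          hs_rest
          ⟨hmin, b0, hb0, hb0v⟩

-- ===== VERDICT (by name: the statement is the Claim_ definition above) =====
theorem keep_minimal_spec : Claim_equal_keep_minimal := by
  intro xs _
  unfold Spec_keep_minimal keep_minimal keep_minimal_alt
  rw [sorted2_eq_sorted_lex]
  have hpw : (PySem.List.sorted xs (fun x => toLex (x.1.1, x.1.2))).Pairwise
      (fun a b => a.1.1 ≤ b.1.1) := by
    refine (PySem.List.sorted_pairwise xs (fun x => toLex (x.1.1, x.1.2))).imp ?_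
    intro a b h
    rcases Prod.Lex.le_iff.mp h with h | h
    · exact le_of_lt h
    · exact le_of_eq h.1
  exact loop_eq _ [] none (by simp) hpw rfl
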